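-- pv_equiv track=rewrite | github.com/dngaspar/stack_data | stack_data/utils.py | highlight_unique
-- ===== SOURCE A (Python) =====
-- import itertools
-- from collections import OrderedDict, Counter
--
-- def highlight_unique(lst):
--     counts = Counter(lst)
--
--     for is_common, group in itertools.groupby(lst, key=lambda x: counts[x] > 3):
--         if is_common:
--             group = list(group)
--             highlighted = [False] * len(group)
--
--             def highlight_index(f):
--                 try:
--                     i = f()
--                 except ValueError:
--                     return None
--                 highlighted[i] = True
--                 return i
--
--             for item in set(group):
--                 first = highlight_index(lambda: group.index(item))
--                 if first is not None:
--                     highlight_index(lambda: group.index(item, first + 1))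
--                 highlight_index(lambda: -1 - group[::-1].index(item))
--         else:
--             highlighted = itertools.repeat(True)
--
--         yield from zip(group, highlighted)
-- ===== SOURCE B (Python) =====
-- def _emit(out, group, common):
--     if common:
--         occ = {}
--         for k, x in enumerate(group):
--             if x in occ:
--                 f, s, l = occ[x]
--                 occ[x] = (f, k if s is None else s, k)
--             else:
--                 occ[x] = (k, None, k)
--         for k, x in enumerate(group):
--             f, s, l = occ[x]
--             out.append((x, k == f or k == s or k == l))
--     else:
--         for x in group:
--             out.append((x, True))
--
--
-- def highlight_unique(lst):
--     counts = {}
--     for x in lst: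
--         counts[x] = counts.get(x, 0) + 1
--     out = []
--     run = []
--     common = False
--     for x in lst:
--         c = counts[x] > 3
--         if run and c != common:
--             _emit(out, run, common)
--             run = []
--         run.append(x)
--         common = c
--     if run:
--         _emit(out, run, common)
--     return out
-- ===== Notes on version B (the rewrite author's own statement) =====
-- stated objective: alternative
-- what changed: Replaces the per-distinct-item repeated group.index / reversed-copy scans with one linear pass per run recording each value's first, second and last occurrence index in a dict, and replaces itertools.groupby with an explicit accumulator loop.
import Mathlib
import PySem

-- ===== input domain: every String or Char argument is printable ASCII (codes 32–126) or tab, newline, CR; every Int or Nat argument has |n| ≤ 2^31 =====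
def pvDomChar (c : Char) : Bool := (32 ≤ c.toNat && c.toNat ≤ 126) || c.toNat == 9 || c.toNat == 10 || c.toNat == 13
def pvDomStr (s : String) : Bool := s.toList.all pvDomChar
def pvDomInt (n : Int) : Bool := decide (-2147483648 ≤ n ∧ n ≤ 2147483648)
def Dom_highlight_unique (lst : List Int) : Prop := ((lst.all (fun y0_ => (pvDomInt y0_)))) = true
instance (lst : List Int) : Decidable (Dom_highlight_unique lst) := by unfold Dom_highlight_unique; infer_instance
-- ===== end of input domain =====

-- B replaces A's per-distinct-item repeated group.index / reversed-copy scans with one linear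
-- pass per run recording each value's first/second/last occurrence index in a dict, and replaces
-- itertools.groupby with an accumulator loop; A is a generator, B returns the same items as a list.

-- ===== PORT A =====
-- itertools.groupby(lst, key): consecutive runs with equal key, transcribed with a run accumulator
def pvGroupGo (key : Int → Bool) (b : Bool) (acc : List Int) : List Int → List (Bool × List Int)
  | [] => [(b, acc)]
  | x :: xs => if key x = b then pvGroupGo key b (acc ++ [x]) xs
               else (b, acc) :: pvGroupGo key (key x) [x] xs

def pvGroupBy (key : Int → Bool) : List Int → List (Bool × List Int)
  | [] => []
  | x :: xs => pvGroupGo key (key x) [x] xs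

-- one iteration of A's 'for item in set(group)': highlight_index for group.index(item),
-- group.index(item, first+1)  (= first+1 + index of item in group[first+1:], exact for lists),
-- and -1 - group[::-1].index(item) (negative index assignment wraps, as pySetD does)
def pvMark (g : List Int) (h : List Bool) (item : Int) : List Bool :=
  match PySem.List.index? g item with
  | none => h            -- ValueError: highlight_index returns None, first is None, nothing set
  | some f =>
    let h1 := PySem.List.pySetD h (f : Int) true
    let h2 := match PySem.List.index? (g.drop (f + 1)) item with
      | none => h1
      | some k => PySem.List.pySetD h1 ((f + 1 + k : Nat) : Int) true
    match PySem.List.index? g.reverse item with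
    | none => h2
    | some r => PySem.List.pySetD h2 (-1 - (r : Int)) true

-- one groupby run: the 'if is_common' body; zip(group, itertools.repeat(True)) = every item True
def pvProcessA (b : Bool) (g : List Int) : List (Int × Bool) :=
  if b then
    let highlighted := (PySem.Set.ofList g).foldl (pvMark g) (List.replicate g.length false)
    g.zip highlighted
  else
    g.map (fun x => (x, true))

def highlight_unique (lst : List Int) : List (Int × Bool) :=
  let counts := PySem.Dict.counter lst
  (pvGroupBy (fun x => counts.getD x 0 > 3) lst).flatMap (fun p => pvProcessA p.1 p.2)

-- ===== PORT B =====
-- occ[x] = (first, second-or-None, last) occurrence index of x in the run, built in one pass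
def pvOcc (g : List Int) : PySem.Dict Int (Int × Option Int × Int) :=
  (PySem.List.enumerate g).foldl (fun d p =>
    match d.get? p.2 with
    | some (f, s, _) => d.insert p.2 (f, (match s with | none => some p.1 | some s0 => some s0), p.1)
    | none => d.insert p.2 (p.1, none, p.1)) PySem.Dict.empty

-- _emit(out, group, common) (out.append(…) loop ported as the list it appends)
def pvEmit (g : List Int) (common : Bool) : List (Int × Bool) :=
  if common then
    let occ := pvOcc g
    (PySem.List.enumerate g).map (fun p =>
      match occ.get? p.2 with
      | some (f, s, l) => (p.2, p.1 == f || s == some p.1 || p.1 == l)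
      | none => (p.2, false))  -- unreachable: every element of g is a key of occ
  else
    g.map (fun x => (x, true))

def highlight_unique_alt (lst : List Int) : List (Int × Bool) :=
  let counts := lst.foldl (fun d x => d.insert x (d.getD x 0 + 1)) (PySem.Dict.empty : PySem.Dict Int Int)
  let st := lst.foldl (fun (st : List (Int × Bool) × List Int × Bool) x =>
      let c := decide (counts.getD x 0 > 3)
      let or : List (Int × Bool) × List Int :=
        if st.2.1 ≠ [] ∧ c ≠ st.2.2 then (st.1 ++ pvEmit st.2.1 st.2.2, []) else (st.1, st.2.1)
      (or.1, or.2 ++ [x], c)) ([], [], false)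
  if st.2.1 ≠ [] then st.1 ++ pvEmit st.2.1 st.2.2 else st.1

-- ===== PRECONDITION & SPEC =====
def Spec_highlight_unique (lst : List Int) (out : List (Int × Bool)) : Prop := out = highlight_unique_alt lst
instance (lst : List Int) (out : List (Int × Bool)) : Decidable (Spec_highlight_unique lst out) := by unfold Spec_highlight_unique; infer_instance

-- ===== CLAIM (what is proved, stated in full; the proofs are below) =====
def Claim_equal_highlight_unique : Prop := ∀ (lst : List Int), Dom_highlight_unique lst → Spec_highlight_unique lst (highlight_unique lst)

-- ===== LEMMAS AND PROOFS =====

def pvTrip (g : List Int) (v : Int) : Option (Int × Option Int × Int) :=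
  match PySem.List.index? g v, PySem.List.index? g.reverse v with
  | some f, some r =>
      some ((f : Int),
            (PySem.List.index? (g.drop (f + 1)) v).map (fun k => ((f + 1 + k : Nat) : Int)),
            ((g.length - 1 - r : Nat) : Int))
  | _, _ => none

theorem pvOcc_step (g' : List Int) (x : Int) :
    pvOcc (g' ++ [x]) =
      (match (pvOcc g').get? x with
       | some (f, s, _) => (pvOcc g').insert x (f, (match s with | none => some ((g'.length : Int)) | some s0 => some s0), (g'.length : Int))
       | none => (pvOcc g').insert x ((g'.length : Int), none, (g'.length : Int))) := by
  unfold pvOcc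
  rw [show PySem.List.enumerate (g' ++ [x]) = PySem.List.enumerate g' ++ [((g'.length : Int), x)] from by
    simp [PySem.List.enumerate_append, PySem.List.enumerate_cons, PySem.List.enumerate_nil]]
  rw [List.foldl_append]
  simp [List.foldl]

theorem pvOcc_eq_trip (g : List Int) (v : Int) : (pvOcc g).get? v = pvTrip g v := by
  induction g using List.reverseRecOn generalizing v with
  | nil =>
    simp [pvOcc, pvTrip, PySem.List.enumerate_nil, PySem.List.index?_eq_idxOf?]
  | append_singleton g' x ih =>
    rw [pvOcc_step]
    by_cases hvx : v = x
    · subst hvx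
      rw [ih v]
      have hrev : (g' ++ [v]).reverse = v :: g'.reverse := by simp
      have e2 : PySem.List.index? (g' ++ [v]).reverse v = some 0 := by
        rw [hrev]; exact PySem.List.index?_cons_self _ _
      by_cases hvg : v ∈ g'
      · obtain ⟨fn, hfn⟩ := Option.isSome_iff_exists.mp ((PySem.List.index?_isSome_iff g' v).mpr hvg)
        obtain ⟨rn, hrn⟩ := Option.isSome_iff_exists.mp ((PySem.List.index?_isSome_iff g'.reverse v).mpr (by simpa using hvg))
        obtain ⟨hflt, hgf, hfirst⟩ := PySem.List.getElem_of_index?_eq_some hfn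
        have e1 : PySem.List.index? (g' ++ [v]) v = some fn := by
          rw [PySem.List.index?_append_of_mem _ hvg, hfn]
        have e3 : (g' ++ [v]).drop (fn + 1) = g'.drop (fn + 1) ++ [v] :=
          List.drop_append_of_le_length (by omega)
        simp only [pvTrip, hfn, hrn, e1, e2, e3]
        by_cases hs : v ∈ g'.drop (fn + 1)
        · obtain ⟨sn, hsn⟩ := Option.isSome_iff_exists.mp ((PySem.List.index?_isSome_iff _ v).mpr hs)
          rw [PySem.List.index?_append_of_mem _ hs]
          simp only [hsn, Option.map_some]
          rw [PySem.Dict.get?_insert_self]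
          simp
        · have hnone : PySem.List.index? (g'.drop (fn + 1)) v = none :=
            (PySem.List.index?_eq_none_iff _ _).mpr hs
          rw [PySem.List.index?_append_singleton_self _ _ hs]
          simp only [hnone, Option.map_none, Option.map_some, List.length_drop]
          rw [PySem.Dict.get?_insert_self]
          simp
          omega
      · have hnone : PySem.List.index? g' v = none := (PySem.List.index?_eq_none_iff _ _).mpr hvg
        have hnoner : PySem.List.index? g'.reverse v = none :=
          (PySem.List.index?_eq_none_iff _ _).mpr (by simpa using hvg)
        have h2 : pvTrip g' v = none := by
          simp only [pvTrip, hnone, hnoner]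
        rw [h2]
        have e1 : PySem.List.index? (g' ++ [v]) v = some g'.length :=
          PySem.List.index?_append_singleton_self _ _ hvg
        have e3 : (g' ++ [v]).drop (g'.length + 1) = [] := by
          apply List.drop_eq_nil_of_le; simp
        simp only [pvTrip, e1, e2, e3]
        rw [PySem.Dict.get?_insert_self]
        simp [PySem.List.index?_eq_idxOf?]
    · -- v ≠ x : the inserted key is x, lookup of v unchanged
      have hstep : (match (pvOcc g').get? x with
       | some (f, s, _) => (pvOcc g').insert x (f, (match s with | none => some ((g'.length : Int)) | some s0 => some s0), (g'.length : Int))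
       | none => (pvOcc g').insert x ((g'.length : Int), none, (g'.length : Int))).get? v = (pvOcc g').get? v := by
        rcases (pvOcc g').get? x with _ | ⟨f, s, l⟩ <;>
          exact PySem.Dict.get?_insert_of_ne _ _ hvx
      rw [hstep, ih v]
      have hrev : (g' ++ [x]).reverse = x :: g'.reverse := by simp
      by_cases hvg : v ∈ g'
      · obtain ⟨fn, hfn⟩ := Option.isSome_iff_exists.mp ((PySem.List.index?_isSome_iff g' v).mpr hvg)
        obtain ⟨rn, hrn⟩ := Option.isSome_iff_exists.mp ((PySem.List.index?_isSome_iff g'.reverse v).mpr (by simpa using hvg))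
        obtain ⟨hflt, hgf, hfirst⟩ := PySem.List.getElem_of_index?_eq_some hfn
        have hrlt : rn < g'.length := by
          have := PySem.List.getElem_of_index?_eq_some hrn
          simpa using this.1
        have e1 : PySem.List.index? (g' ++ [x]) v = some fn := by
          rw [PySem.List.index?_append_of_mem _ hvg, hfn]
        have e2 : PySem.List.index? (g' ++ [x]).reverse v = some (rn + 1) := by
          rw [hrev, PySem.List.index?_cons_of_ne _ (fun h => hvx h.symm), hrn]; rfl
        have e3 : (g' ++ [x]).drop (fn + 1) = g'.drop (fn + 1) ++ [x] :=
          List.drop_append_of_le_length (by omega)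
        simp only [pvTrip, hfn, hrn, e1, e2, e3]
        by_cases hs : v ∈ g'.drop (fn + 1)
        · rw [PySem.List.index?_append_of_mem _ hs]
          simp
          omega
        · have hnone : PySem.List.index? (g'.drop (fn + 1)) v = none :=
            (PySem.List.index?_eq_none_iff _ _).mpr hs
          have hnone2 : PySem.List.index? (g'.drop (fn + 1) ++ [x]) v = none :=
            (PySem.List.index?_eq_none_iff _ _).mpr (by simp [hs]; exact fun h => hvx h)
          simp only [hnone, hnone2, Option.map_none,
            Option.some.injEq, Prod.mk.injEq, List.length_append, List.length_singleton]
          refine ⟨trivial, trivial, ?_⟩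
          omega
      · have hnone : PySem.List.index? g' v = none := (PySem.List.index?_eq_none_iff _ _).mpr hvg
        have hnone2 : PySem.List.index? (g' ++ [x]) v = none :=
          (PySem.List.index?_eq_none_iff _ _).mpr (by simp [hvg]; exact fun h => hvx h)
        simp only [pvTrip, hnone, hnone2]

-- Python's highlighted[-1 - r] = True : negative index assignment wraps from the end
theorem pvSetD_neg (xs : List Bool) (r : Nat) (h : r + 1 ≤ xs.length) :
    PySem.List.pySetD xs (-1 - (r : Int)) true = xs.set (xs.length - (r + 1)) true := by
  have c1 : ¬((r : Int) ≤ -1) := by omega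
  have c2 : 1 + (r : Int) ≤ (xs.length : Int) := by omega
  simp [PySem.List.pySetD, PySem.List.pySet?, PySem.List.pyIdx?]
  rw [if_neg c1, if_pos c2]
  simp

def pvIsMarked (g : List Int) (v : Int) (k : Nat) : Bool :=
  match pvTrip g v with
  | some (f, s, l) => ((k : Int) == f) || (s == some (k : Int)) || ((k : Int) == l)
  | none => false

theorem pvMark_length (g : List Int) (h : List Bool) (v : Int) :
    (pvMark g h v).length = h.length := by
  unfold pvMark
  split
  · rfl
  · dsimp only
    split <;> split <;> simp [PySem.List.length_pySetD]

theorem pvIsMarked_imp (g : List Int) (v : Int) (k : Nat) (hk : k < g.length)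
    (hm : pvIsMarked g v k = true) : g[k] = v := by
  unfold pvIsMarked pvTrip at hm
  rcases hf : PySem.List.index? g v with _ | fn <;> rw [hf] at hm
  · rcases PySem.List.index? g.reverse v with _ | rn <;> simp at hm
  · rcases hr : PySem.List.index? g.reverse v with _ | rn <;> rw [hr] at hm
    · simp at hm
    · obtain ⟨hflt, hgf, -⟩ := PySem.List.getElem_of_index?_eq_some hf
      obtain ⟨hrlt, hgr, -⟩ := PySem.List.getElem_of_index?_eq_some hr
      simp only [Bool.or_eq_true, beq_iff_eq] at hm
      rcases hm with (hm | hm) | hm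
      · have : k = fn := by exact_mod_cast hm
        subst this; exact hgf
      · rcases hs : PySem.List.index? (g.drop (fn + 1)) v with _ | k2 <;> rw [hs] at hm
        · simp at hm
        · simp only [Option.map_some, Option.some.injEq] at hm
          have hkeq : k = fn + 1 + k2 := by exact_mod_cast hm.symm
          obtain ⟨hk2, hg2, -⟩ := PySem.List.getElem_of_index?_eq_some hs
          subst hkeq
          rw [← List.getElem_drop]
          · exact hg2
      · have hkeq : k = g.length - 1 - rn := by exact_mod_cast hm
        subst hkeq
        rw [List.getElem_reverse] at hgr
        · simpa using hgr

theorem pvMark_get? (g : List Int) (h : List Bool) (v : Int) (hv : v ∈ g)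
    (hlen : h.length = g.length) (k : Nat) (hk : k < g.length) :
    (pvMark g h v)[k]? = h[k]?.map (fun b => pvIsMarked g v k || b) := by
  obtain ⟨fn, hf⟩ := Option.isSome_iff_exists.mp ((PySem.List.index?_isSome_iff g v).mpr hv)
  obtain ⟨rn, hr⟩ := Option.isSome_iff_exists.mp ((PySem.List.index?_isSome_iff g.reverse v).mpr (by simpa using hv))
  obtain ⟨hflt, hgf, -⟩ := PySem.List.getElem_of_index?_eq_some hf
  obtain ⟨hrlt', hgr, -⟩ := PySem.List.getElem_of_index?_eq_some hr
  have hrlt : rn < g.length := by simpa using hrlt'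
  have hkh : k < h.length := by omega
  have hsub : g.length - 1 - rn = g.length - (rn + 1) := by omega
  unfold pvMark pvIsMarked pvTrip
  rw [hf, hr]
  dsimp only
  cases hs : PySem.List.index? (g.drop (fn + 1)) v with
  | none =>
    dsimp only
    rw [PySem.List.pySetD_natCast, pvSetD_neg _ rn (by simp [hlen]; omega)]
    rw [List.getElem?_set_of_lt' _ _ (by simp [hlen]; omega),
        List.getElem?_set_of_lt' _ _ (by omega)]
    rw [List.getElem?_eq_getElem hkh]
    simp only [List.length_set, hlen, hsub, Option.map_some]
    by_cases e1 : fn = k <;> by_cases e2 : g.length - (rn + 1) = k <;>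
      simp [e1, e2, Nat.cast_inj]
    all_goals (intro hcon; exfalso; omega)
  | some k2 =>
    dsimp only
    obtain ⟨hk2, hg2, -⟩ := PySem.List.getElem_of_index?_eq_some hs
    have hk2' : fn + 1 + k2 < g.length := by simp [List.length_drop] at hk2; omega
    rw [PySem.List.pySetD_natCast, PySem.List.pySetD_natCast,
        pvSetD_neg _ rn (by simp [hlen]; omega)]
    rw [List.getElem?_set_of_lt' _ _ (by simp [hlen]; omega),
        List.getElem?_set_of_lt' _ _ (by simp [hlen]; omega),
        List.getElem?_set_of_lt' _ _ (by omega)]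
    rw [List.getElem?_eq_getElem hkh]
    simp only [List.length_set, hlen, hsub, Option.map_some]
    by_cases e1 : fn = k <;> by_cases e2 : fn + 1 + k2 = k <;>
      by_cases e3 : g.length - (rn + 1) = k <;>
      simp [e1, e2, e3, Nat.cast_inj]
    all_goals (intro hcon; exfalso; omega)

theorem pvFold_marks (g : List Int) (ds : List Int) (h : List Bool)
    (hds : ∀ v ∈ ds, v ∈ g) (hlen : h.length = g.length) (k : Nat) (hk : k < g.length) :
    (ds.foldl (pvMark g) h)[k]? = h[k]?.map (fun b => ds.any (fun v => pvIsMarked g v k) || b) := by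
  induction ds generalizing h with
  | nil => simp
  | cons v ds ih =>
    rw [List.foldl_cons, ih (pvMark g h v) (fun w hw => hds w (List.mem_cons_of_mem _ hw))
      (by rw [pvMark_length, hlen]),
      pvMark_get? g h v (hds v (List.mem_cons_self)) hlen k hk]
    rw [List.getElem?_eq_getElem (by omega : k < h.length)]
    simp only [Option.map_some, List.any_cons, Bool.or_assoc, Bool.or_left_comm]

theorem pvAny_isMarked (g : List Int) (k : Nat) (hk : k < g.length) :
    ((PySem.Set.ofList g).any (fun v => pvIsMarked g v k)) = pvIsMarked g (g[k]) k := by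
  cases hm : pvIsMarked g (g[k]) k with
  | true =>
    rw [List.any_eq_true]
    exact ⟨g[k], (PySem.Set.mem_ofList g _).mpr (List.getElem_mem hk), hm⟩
  | false =>
    rw [List.any_eq_false]
    intro v hv hmv
    have hveq := pvIsMarked_imp g v k hk hmv
    rw [hveq] at hm
    rw [hm] at hmv
    exact absurd hmv (by simp)

theorem pvFoldMark_length (g : List Int) (ds : List Int) (h : List Bool) :
    (ds.foldl (pvMark g) h).length = h.length := by
  induction ds generalizing h with
  | nil => rfl
  | cons v ds ih => rw [List.foldl_cons, ih, pvMark_length]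

theorem pvTrip_isSome (g : List Int) (v : Int) (hv : v ∈ g) : (pvTrip g v).isSome := by
  obtain ⟨fn, hf⟩ := Option.isSome_iff_exists.mp ((PySem.List.index?_isSome_iff g v).mpr hv)
  obtain ⟨rn, hr⟩ := Option.isSome_iff_exists.mp ((PySem.List.index?_isSome_iff g.reverse v).mpr (by simpa using hv))
  unfold pvTrip
  rw [hf, hr]
  rfl

theorem pvProcessA_eq_pvEmit (b : Bool) (g : List Int) : pvProcessA b g = pvEmit g b := by
  cases b with
  | false => rfl
  | true =>
    unfold pvProcessA pvEmit
    simp only [if_pos]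
    have hlenH : ((PySem.Set.ofList g).foldl (pvMark g) (List.replicate g.length false)).length
        = g.length := by
      rw [pvFoldMark_length, List.length_replicate]
    apply List.ext_getElem?
    intro i
    by_cases hig : i < g.length
    · have hzi : i < (g.zip ((PySem.Set.ofList g).foldl (pvMark g) (List.replicate g.length false))).length := by
        rw [List.length_zip, hlenH, Nat.min_self]; exact hig
      rw [List.getElem?_eq_getElem hzi, List.getElem_zip, List.getElem?_map]
      have he : (PySem.List.enumerate g)[i]? = some (((i : Int), g[i])) := by
        rw [PySem.List.getElem?_enumerate, List.getElem?_eq_getElem hig]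
        simp
      rw [he]
      have hH := pvFold_marks g (PySem.Set.ofList g) (List.replicate g.length false)
        (fun v hv => (PySem.Set.mem_ofList g v).mp hv) (by simp) i hig
      rw [List.getElem?_eq_getElem (by rw [hlenH]; exact hig),
          List.getElem?_eq_getElem (by simpa using hig)] at hH
      simp only [List.getElem_replicate, Option.map_some, Bool.or_false] at hH
      have htrue : ((PySem.Set.ofList g).foldl (pvMark g) (List.replicate g.length false))[i]'(by rw [hlenH]; exact hig) =
          pvIsMarked g (g[i]) i := by
        rw [Option.some_inj.mp hH, pvAny_isMarked g i hig]
      rw [htrue, Option.map_some]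
      rw [pvOcc_eq_trip]
      unfold pvIsMarked
      cases htrip : pvTrip g (g[i]) with
      | none =>
        exact absurd (pvTrip_isSome g (g[i]) (List.getElem_mem hig)) (by rw [htrip]; simp)
      | some t =>
        rcases t with ⟨f, s, l⟩
        rfl
    · rw [List.getElem?_eq_none, List.getElem?_eq_none]
      · rw [List.length_map, PySem.List.length_enumerate]; omega
      · rw [List.length_zip, hlenH, Nat.min_self]; omega

theorem pvGroupGo_cons (key : Int → Bool) (b : Bool) (run : List Int) (x : Int) (xs : List Int) :
    pvGroupGo key b run (x :: xs) =
      if key x = b then pvGroupGo key b (run ++ [x]) xs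
      else (b, run) :: pvGroupGo key (key x) [x] xs := rfl

theorem pvAlt_loop (key : Int → Bool) (xs : List Int) (out : List (Int × Bool))
    (run : List Int) (b : Bool) (hrun : run ≠ []) :
    (let st := xs.foldl (fun (st : List (Int × Bool) × List Int × Bool) x =>
        let c := key x
        let or : List (Int × Bool) × List Int :=
          if st.2.1 ≠ [] ∧ c ≠ st.2.2 then (st.1 ++ pvEmit st.2.1 st.2.2, []) else (st.1, st.2.1)
        (or.1, or.2 ++ [x], c)) (out, run, b)
     if st.2.1 ≠ [] then st.1 ++ pvEmit st.2.1 st.2.2 else st.1)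
    = out ++ (pvGroupGo key b run xs).flatMap (fun p => pvEmit p.2 p.1) := by
  induction xs generalizing out run b with
  | nil =>
    simp only [List.foldl_nil, pvGroupGo]
    rw [if_pos hrun]
    simp
  | cons x xs ih =>
    show (let st := List.foldl _ ((fun (st : List (Int × Bool) × List Int × Bool) x =>
        let c := key x
        let or : List (Int × Bool) × List Int :=
          if st.2.1 ≠ [] ∧ c ≠ st.2.2 then (st.1 ++ pvEmit st.2.1 st.2.2, []) else (st.1, st.2.1)
        (or.1, or.2 ++ [x], c)) (out, run, b) x) xs
      if st.2.1 ≠ [] then st.1 ++ pvEmit st.2.1 st.2.2 else st.1) = _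
  -- placeholder
    by_cases hc : key x = b
    · have hcond : ¬(run ≠ [] ∧ key x ≠ b) := by simp [hc]
      have hstep : ((fun (st : List (Int × Bool) × List Int × Bool) x =>
        let c := key x
        let or : List (Int × Bool) × List Int :=
          if st.2.1 ≠ [] ∧ c ≠ st.2.2 then (st.1 ++ pvEmit st.2.1 st.2.2, []) else (st.1, st.2.1)
        (or.1, or.2 ++ [x], c)) (out, run, b) x) = (out, run ++ [x], key x) := by
        simp only []
        rw [if_neg hcond]
      rw [hstep]
      refine (ih out (run ++ [x]) (key x) (by simp)).trans ?_
      rw [pvGroupGo_cons, if_pos hc, hc]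
    · have hcond : (run ≠ [] ∧ key x ≠ b) := ⟨hrun, hc⟩
      have hstep : ((fun (st : List (Int × Bool) × List Int × Bool) x =>
        let c := key x
        let or : List (Int × Bool) × List Int :=
          if st.2.1 ≠ [] ∧ c ≠ st.2.2 then (st.1 ++ pvEmit st.2.1 st.2.2, []) else (st.1, st.2.1)
        (or.1, or.2 ++ [x], c)) (out, run, b) x) = (out ++ pvEmit run b, [x], key x) := by
        simp only []
        rw [if_pos hcond]
        rfl
      rw [hstep]
      refine (ih (out ++ pvEmit run b) [x] (key x) (by simp)).trans ?_
      rw [pvGroupGo_cons, if_neg hc]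
      simp [List.append_assoc]

theorem pv_flatMap_eq (G : List (Bool × List Int)) :
    G.flatMap (fun p => pvProcessA p.1 p.2) = G.flatMap (fun p => pvEmit p.2 p.1) := by
  have h : (fun (p : Bool × List Int) => pvProcessA p.1 p.2) = (fun p => pvEmit p.2 p.1) :=
    funext fun p => pvProcessA_eq_pvEmit p.1 p.2
  rw [h]

theorem highlight_unique_spec' : ∀ (lst : List Int),
    highlight_unique lst = highlight_unique_alt lst := by
  intro lst
  cases lst with
  | nil => rfl
  | cons x rest =>
    have hA : highlight_unique (x :: rest) = (pvGroupBy
        (fun y => decide (((x :: rest).foldl (fun d z => d.insert z (d.getD z 0 + 1)) (PySem.Dict.empty : PySem.Dict Int Int)).getD y 0 > 3))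
        (x :: rest)).flatMap (fun p => pvProcessA p.1 p.2) := rfl
    have hB : highlight_unique_alt (x :: rest) =
      (let counts := (x :: rest).foldl (fun d y => d.insert y (d.getD y 0 + 1)) (PySem.Dict.empty : PySem.Dict Int Int)
       let st := rest.foldl (fun (st : List (Int × Bool) × List Int × Bool) y =>
          let c := decide (counts.getD y 0 > 3)
          let or : List (Int × Bool) × List Int :=
            if st.2.1 ≠ [] ∧ c ≠ st.2.2 then (st.1 ++ pvEmit st.2.1 st.2.2, []) else (st.1, st.2.1)
          (or.1, or.2 ++ [y], c)) ([], [x], decide (counts.getD x 0 > 3))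
       if st.2.1 ≠ [] then st.1 ++ pvEmit st.2.1 st.2.2 else st.1) := rfl
    rw [hA, hB]
    simp only []
    refine Eq.trans ?_ (pvAlt_loop
      (fun y => decide (((x :: rest).foldl (fun d z => d.insert z (d.getD z 0 + 1)) (PySem.Dict.empty : PySem.Dict Int Int)).getD y 0 > 3))
      rest [] [x] _ (by simp)).symm
    exact (pv_flatMap_eq _).trans (List.nil_append _).symm

-- ===== VERDICT (by name: the statement is the Claim_ definition above) =====
theorem highlight_unique_spec : Claim_equal_highlight_unique := by
  intro lst _
  exact highlight_unique_spec' lst
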